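-- pv_equiv track=rewrite | github.com/frankvogt/vcf2gwas | vcf2gwas/utils.py | set_model
-- ===== SOURCE A (Python) =====
-- def set_model(lm, gk, eigen, lmm, bslmm):
--
--     l = ["-lm", "-gk", "-eigen", "-lmm", "-bslmm"]
--     model = None
--     n = 0
--     for i in (lm, gk, eigen, lmm, bslmm):
--         if i != None and i != False:
--             model = l[n]
--         n += 1
--     return model
-- ===== SOURCE B (Python) =====
-- def set_model(lm, gk, eigen, lmm, bslmm):
--     # Encode the five flags as a 5-bit mask (bit i set iff argument i is set,
--     # i.e. != None and != False); the answer is the label of the highest set bit.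
--     def on(v):
--         return v != None and v != False
--     mask = (on(lm) | (on(gk) << 1) | (on(eigen) << 2)
--             | (on(lmm) << 3) | (on(bslmm) << 4))
--     if mask == 0:
--         return None
--     return ["-lm", "-gk", "-eigen", "-lmm", "-bslmm"][mask.bit_length() - 1]
-- ===== Notes on version B (the rewrite author's own statement) =====
-- stated objective: alternative
-- what changed: Replaces A's forward overwrite-scan over a label list with an index counter by a loop-free bitmask encoding: each set flag (!= None and != False) contributes one bit, and the answer is the label at the position of the highest set bit (mask.bit_length()-1), None for mask 0.
import Mathlib
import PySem

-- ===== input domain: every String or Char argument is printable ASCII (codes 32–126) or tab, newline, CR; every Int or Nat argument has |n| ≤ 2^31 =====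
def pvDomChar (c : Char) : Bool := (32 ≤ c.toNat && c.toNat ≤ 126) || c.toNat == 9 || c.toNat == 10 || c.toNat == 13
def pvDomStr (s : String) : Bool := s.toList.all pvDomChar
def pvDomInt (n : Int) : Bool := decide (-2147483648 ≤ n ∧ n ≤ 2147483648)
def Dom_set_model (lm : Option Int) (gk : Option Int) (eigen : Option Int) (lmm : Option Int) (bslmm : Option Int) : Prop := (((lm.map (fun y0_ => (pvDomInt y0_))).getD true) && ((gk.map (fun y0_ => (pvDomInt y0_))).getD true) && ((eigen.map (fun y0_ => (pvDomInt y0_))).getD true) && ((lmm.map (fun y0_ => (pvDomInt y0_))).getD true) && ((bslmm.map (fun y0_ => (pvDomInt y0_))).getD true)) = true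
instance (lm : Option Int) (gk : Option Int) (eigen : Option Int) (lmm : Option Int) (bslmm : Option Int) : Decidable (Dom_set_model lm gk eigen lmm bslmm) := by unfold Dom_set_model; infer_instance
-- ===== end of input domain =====

-- B replaces A's forward overwrite-scan (label list + index counter) by a loop-free
-- bitmask encoding whose highest set bit indexes the label list; same result, similar cost.

-- ===== PORT A =====
-- forward loop: overwrite `model` with l[n] whenever i != None and i != False
-- (for int values, `i != False` is Python's numeric equality, i.e. i ≠ 0)
def set_model (lm : Option Int) (gk : Option Int) (eigen : Option Int) (lmm : Option Int) (bslmm : Option Int) : Option String :=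
  let l := ["-lm", "-gk", "-eigen", "-lmm", "-bslmm"]
  let r := [lm, gk, eigen, lmm, bslmm].foldl
    (fun (st : Option String × Nat) i =>
      (if i ≠ none ∧ i ≠ some 0 then some (l.getD st.2 "") else st.1, st.2 + 1))
    (none, 0)
  r.1

-- ===== PORT B =====
-- on v = (v != None and v != False); mask = 5-bit encoding; answer = label at
-- mask.bit_length() - 1 (= Nat.log2 mask for mask > 0), None if mask = 0
def set_model_on (v : Option Int) : Bool := decide (v ≠ none ∧ v ≠ some 0)

def set_model_alt (lm : Option Int) (gk : Option Int) (eigen : Option Int) (lmm : Option Int) (bslmm : Option Int) : Option String :=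
  let mask : Nat :=
    (cond (set_model_on lm) 1 0) |||
    ((cond (set_model_on gk) 1 0) <<< 1) |||
    ((cond (set_model_on eigen) 1 0) <<< 2) |||
    ((cond (set_model_on lmm) 1 0) <<< 3) |||
    ((cond (set_model_on bslmm) 1 0) <<< 4)
  if mask = 0 then none
  else some (["-lm", "-gk", "-eigen", "-lmm", "-bslmm"].getD (Nat.log2 mask) "")

-- ===== PRECONDITION & SPEC =====
def Spec_set_model (lm : Option Int) (gk : Option Int) (eigen : Option Int) (lmm : Option Int) (bslmm : Option Int) (out : Option String) : Prop := out = set_model_alt lm gk eigen lmm bslmm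
instance (lm : Option Int) (gk : Option Int) (eigen : Option Int) (lmm : Option Int) (bslmm : Option Int) (out : Option String) : Decidable (Spec_set_model lm gk eigen lmm bslmm out) := by unfold Spec_set_model; infer_instance

-- ===== CLAIM (what is proved, stated in full; the proofs are below) =====
def Claim_equal_set_model : Prop := ∀ (lm : Option Int) (gk : Option Int) (eigen : Option Int) (lmm : Option Int) (bslmm : Option Int), Dom_set_model lm gk eigen lmm bslmm → Spec_set_model lm gk eigen lmm bslmm (set_model lm gk eigen lmm bslmm)

-- ===== LEMMAS AND PROOFS =====

-- ===== VERDICT (by name: the statement is the Claim_ definition above) =====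
theorem set_model_spec : Claim_equal_set_model := by
  intro lm gk eigen lmm bslmm _
  unfold Spec_set_model set_model set_model_alt
  have hcond : ∀ v : Option Int, (v ≠ none ∧ v ≠ some 0) = (set_model_on v = true) := by
    intro v; simp [set_model_on]
  simp only [List.foldl, hcond]
  cases set_model_on lm <;> cases set_model_on gk <;> cases set_model_on eigen <;>
    cases set_model_on lmm <;> cases set_model_on bslmm <;> rfl
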